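-- pv_equiv track=rewrite | github.com/bigsmartben/sdd | src/specify_cli/runtime_common.py | summarize_status_rows
-- ===== SOURCE A (Python) =====
-- from collections import Counter
--
-- def clean_cell(value: str) -> str:
--     return value.strip().strip("`").strip()
--
-- def summarize_status_rows(rows: list[dict[str, str]]) -> dict[str, dict[str, int]]:
--     summary: dict[str, Counter[str]] = {}
--     for row in rows:
--         unit_type = clean_cell(row.get("Unit Type", "unknown")) or "unknown"
--         status = clean_cell(row.get("Status", "unknown")) or "unknown"
--         summary.setdefault(unit_type, Counter())
--         summary[unit_type][status] += 1
--     return {unit_type: dict(counter) for unit_type, counter in summary.items()}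
-- ===== SOURCE B (Python) =====
-- from collections import Counter
--
-- def clean_cell(value: str) -> str:
--     return value.strip().strip("`").strip()
--
-- def summarize_status_rows(rows: list[dict[str, str]]) -> dict[str, dict[str, int]]:
--     pairs = [
--         (clean_cell(row.get("Unit Type", "unknown")) or "unknown",
--          clean_cell(row.get("Status", "unknown")) or "unknown")
--         for row in rows
--     ]
--     result: dict[str, dict[str, int]] = {}
--     for (unit_type, status), count in Counter(pairs).items():
--         result.setdefault(unit_type, {})[status] = count
--     return result
-- ===== Notes on version B (the rewrite author's own statement) =====
-- stated objective: idiomatic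
-- what changed: A maintains a nested dict of Counters incrementally while looping over rows; B flattens the rows into normalized (unit_type, status) pairs, counts them all with one tuple-keyed Counter, and reshapes the counter items into the nested dict in a second pass.
import Mathlib
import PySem

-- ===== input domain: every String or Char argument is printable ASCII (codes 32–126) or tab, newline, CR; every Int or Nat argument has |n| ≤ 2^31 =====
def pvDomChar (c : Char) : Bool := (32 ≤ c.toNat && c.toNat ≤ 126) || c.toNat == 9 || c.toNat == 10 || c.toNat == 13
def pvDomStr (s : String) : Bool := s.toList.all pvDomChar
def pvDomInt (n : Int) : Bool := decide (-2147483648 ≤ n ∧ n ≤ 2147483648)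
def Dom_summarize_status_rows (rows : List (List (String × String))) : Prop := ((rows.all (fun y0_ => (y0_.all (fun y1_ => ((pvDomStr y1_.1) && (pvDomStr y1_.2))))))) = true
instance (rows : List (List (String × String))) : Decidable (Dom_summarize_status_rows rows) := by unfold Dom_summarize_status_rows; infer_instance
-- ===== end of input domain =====

-- B replaces A's incremental nested-Counter maintenance by a flatten-count-reshape pipeline
-- (normalize rows to (unit, status) pairs, count them with one tuple-keyed Counter, reshape);
-- objective: idiomatic, same cost.

-- ===== PORT A =====
-- clean_cell(value) = value.strip().strip("`").strip()
def pvClean (v : String) : String :=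
  PySem.Str.strip (PySem.Str.stripChars (PySem.Str.strip v) "`")

-- clean_cell(row.get(k, "unknown")) or "unknown"   (this expression occurs verbatim in both Pythons)
def pvField (row : List (String × String)) (k : String) : String :=
  let c := pvClean ((PySem.Dict.mk row).getD k "unknown")
  if c = "" then "unknown" else c

def summarize_status_rows (rows : List (List (String × String))) : List (String × List (String × Int)) :=
  let summary : PySem.Dict String (PySem.Dict String Int) :=
    rows.foldl (fun summary row =>
      let unit_type := pvField row "Unit Type"
      let status := pvField row "Status"
      let summary := summary.setdefault unit_type PySem.Dict.empty
      summary.modify unit_type PySem.Dict.empty (fun c => c.modify status 0 (· + 1)))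
      PySem.Dict.empty
  summary.items.map (fun p => (p.1, p.2.items))

-- ===== PORT B =====
def summarize_status_rows_alt (rows : List (List (String × String))) : List (String × List (String × Int)) :=
  let pairs : List (String × String) :=
    rows.map (fun row => (pvField row "Unit Type", pvField row "Status"))
  let result : PySem.Dict String (PySem.Dict String Int) :=
    (PySem.Dict.counter pairs).items.foldl (fun result p =>
      let r := result.setdefault p.1.1 PySem.Dict.empty
      r.modify p.1.1 PySem.Dict.empty (fun c => c.insert p.1.2 p.2))
      PySem.Dict.empty
  result.items.map (fun p => (p.1, p.2.items))

-- ===== PRECONDITION & SPEC =====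
def Spec_summarize_status_rows (rows : List (List (String × String))) (out : List (String × List (String × Int))) : Prop := out = summarize_status_rows_alt rows
instance (rows : List (List (String × String))) (out : List (String × List (String × Int))) : Decidable (Spec_summarize_status_rows rows out) := by unfold Spec_summarize_status_rows; infer_instance

-- ===== CLAIM (what is proved, stated in full; the proofs are below) =====
def Claim_equal_summarize_status_rows : Prop := ∀ (rows : List (List (String × String))), Dom_summarize_status_rows rows → Spec_summarize_status_rows rows (summarize_status_rows rows)

-- ===== LEMMAS AND PROOFS =====

-- A's/B's loop body: setdefault-then-modify at the same key is a single insert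
theorem pv_sdm {ν : Type} (d : PySem.Dict String ν) (u : String) (v0 : ν) (f : ν → ν) :
    (d.setdefault u v0).modify u v0 f = d.insert u (f (d.getD u v0)) := by
  by_cases h : d.contains u
  · rw [PySem.Dict.setdefault_of_contains d v0 h]; rfl
  · rw [PySem.Dict.setdefault_of_not_contains d v0 (by simpa using h)]
    simp [PySem.Dict.modify, PySem.Dict.getD_insert_self, PySem.Dict.insert_insert_self,
      PySem.Dict.getD_of_not_contains d v0 (by simpa using h)]

def pvAStep (d : PySem.Dict String (PySem.Dict String Int)) (p : String × String) :
    PySem.Dict String (PySem.Dict String Int) :=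
  d.insert p.1 ((d.getD p.1 PySem.Dict.empty).modify p.2 0 (· + 1))

def pvBStep (r : PySem.Dict String (PySem.Dict String Int)) (p : (String × String) × Int) :
    PySem.Dict String (PySem.Dict String Int) :=
  r.insert p.1.1 ((r.getD p.1.1 PySem.Dict.empty).insert p.1.2 p.2)

def pvPairs (rows : List (List (String × String))) : List (String × String) :=
  rows.map (fun row => (pvField row "Unit Type", pvField row "Status"))

theorem pv_A_eq (rows : List (List (String × String))) :
    summarize_status_rows rows
      = ((pvPairs rows).foldl pvAStep PySem.Dict.empty).items.map (fun p => (p.1, p.2.items)) := by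
  simp only [summarize_status_rows, pvPairs, List.foldl_map]
  congr 2
  apply PySem.List.foldl_congr_mem
  intro acc row _
  rw [pv_sdm]
  simp only [pvAStep]

theorem pv_B_eq (rows : List (List (String × String))) :
    summarize_status_rows_alt rows
      = ((PySem.Dict.counter (pvPairs rows)).items.foldl pvBStep
          PySem.Dict.empty).items.map (fun p => (p.1, p.2.items)) := by
  simp only [summarize_status_rows_alt, pvPairs]
  congr 2
  apply PySem.List.foldl_congr_mem
  intro acc p _
  rw [pv_sdm]
  simp only [pvBStep]

theorem pv_getD_A (l : List (String × String)) (u : String) : ∀ d,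
    (l.foldl pvAStep d).getD u PySem.Dict.empty
    = ((l.filter (fun p => p.1 == u)).map Prod.snd).foldl
        (fun c s => c.modify s 0 (· + 1)) (d.getD u PySem.Dict.empty) := by
  induction l with
  | nil => intro d; rfl
  | cons p t ih =>
    intro d
    simp only [List.foldl_cons, List.filter_cons]
    by_cases h : p.1 = u
    · simp only [h, beq_self_eq_true, if_pos, List.map_cons, List.foldl_cons, ih,
        pvAStep, PySem.Dict.getD_insert_self]
    · have hne : u ≠ p.1 := fun e => h e.symm
      simp only [beq_iff_eq, h, if_neg, ih, pvAStep,
        PySem.Dict.getD_insert_of_ne _ _ _ hne]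
      simp [h]

theorem pv_getD_B (l : List ((String × String) × Int)) (u : String) : ∀ r,
    (l.foldl pvBStep r).getD u PySem.Dict.empty
    = ((l.filter (fun p => p.1.1 == u)).map (fun p => (p.1.2, p.2))).foldl
        (fun c q => c.insert q.1 q.2) (r.getD u PySem.Dict.empty) := by
  induction l with
  | nil => intro r; rfl
  | cons p t ih =>
    intro r
    simp only [List.foldl_cons, List.filter_cons]
    by_cases h : p.1.1 = u
    · simp only [h, beq_self_eq_true, if_pos, List.map_cons, List.foldl_cons, ih,
        pvBStep, PySem.Dict.getD_insert_self]
    · have hne : u ≠ p.1.1 := fun e => h e.symm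
      simp only [beq_iff_eq, h, if_neg, ih, pvBStep,
        PySem.Dict.getD_insert_of_ne _ _ _ hne]
      simp [h]

theorem pv_ofList_append {α : Type} [BEq α] (l : List α) (x : α) :
    PySem.Set.ofList (l ++ [x]) = PySem.Set.add (PySem.Set.ofList l) x := by
  simp [PySem.Set.ofList, List.foldl_append]

theorem pv_add_eq {α : Type} [BEq α] [LawfulBEq α] (s : PySem.Set α) (x : α) :
    PySem.Set.add s x = if x ∈ s then s else s ++ [x] := by
  simp [PySem.Set.add, PySem.Set.contains]

theorem pv_ofList_map_ofList {α β : Type} [BEq α] [LawfulBEq α] [BEq β] [LawfulBEq β]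
    (f : α → β) (l : List α) :
    PySem.Set.ofList ((PySem.Set.ofList l).map f) = PySem.Set.ofList (l.map f) := by
  induction l using List.reverseRecOn with
  | nil => rfl
  | append_singleton l x ih =>
    rw [pv_ofList_append, pv_add_eq (PySem.Set.ofList l) x]
    simp only [List.map_append, List.map_cons, List.map_nil]
    rw [pv_ofList_append (l.map f) (f x)]
    by_cases hx : x ∈ PySem.Set.ofList l
    · have hm : f x ∈ PySem.Set.ofList (l.map f) :=
        (PySem.Set.mem_ofList _ _).mpr (List.mem_map_of_mem ((PySem.Set.mem_ofList l x).mp hx))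
      rw [if_pos hx, ih, pv_add_eq, if_pos hm]
    · rw [if_neg hx]
      simp only [List.map_append, List.map_cons, List.map_nil]
      rw [pv_ofList_append, ih]

theorem pv_ofList_filter {α : Type} [BEq α] [LawfulBEq α] (p : α → Bool) (l : List α) :
    (PySem.Set.ofList l).filter p = PySem.Set.ofList (l.filter p) := by
  induction l using List.reverseRecOn with
  | nil => rfl
  | append_singleton l x ih =>
    rw [pv_ofList_append, pv_add_eq (PySem.Set.ofList l) x, List.filter_append]
    by_cases hp : p x
    · simp only [List.filter_cons, hp, if_pos, List.filter_nil]
      rw [pv_ofList_append (l.filter p) x, pv_add_eq]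
      by_cases hx : x ∈ PySem.Set.ofList l
      · have hm : x ∈ PySem.Set.ofList (l.filter p) :=
          (PySem.Set.mem_ofList _ _).mpr
            (List.mem_filter.mpr ⟨(PySem.Set.mem_ofList l x).mp hx, hp⟩)
        rw [if_pos hx, if_pos hm, ih]
      · have hm : x ∉ PySem.Set.ofList (l.filter p) := fun hmem =>
          hx ((PySem.Set.mem_ofList l x).mpr
            (List.mem_filter.mp ((PySem.Set.mem_ofList _ _).mp hmem)).1)
        rw [if_neg hx, if_neg hm, List.filter_append, ih]
        simp [List.filter_cons, hp]
    · have hp' : p x = false := by simpa using hp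
      by_cases hx : x ∈ PySem.Set.ofList l
      · rw [if_pos hx, ih]
        simp [List.filter_cons, hp']
      · rw [if_neg hx, List.filter_append, ih]
        simp [List.filter_cons, hp']

theorem pv_ofList_map_snd {α β : Type} [BEq α] [LawfulBEq α] [BEq β] [LawfulBEq β]
    (u : α) (l : List (α × β)) (h : ∀ x ∈ l, x.1 = u) :
    (PySem.Set.ofList l).map Prod.snd = PySem.Set.ofList (l.map Prod.snd) := by
  induction l using List.reverseRecOn with
  | nil => rfl
  | append_singleton l x ih =>
    have hl : ∀ y ∈ l, y.1 = u := fun y hy => h y (List.mem_append_left _ hy)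
    have hx1 : x.1 = u := h x (List.mem_append_right _ (List.mem_singleton_self x))
    rw [pv_ofList_append, pv_add_eq (PySem.Set.ofList l) x]
    simp only [List.map_append, List.map_cons, List.map_nil]
    rw [pv_ofList_append (l.map Prod.snd) x.2, pv_add_eq]
    by_cases hx : x ∈ PySem.Set.ofList l
    · have hm : x.2 ∈ PySem.Set.ofList (l.map Prod.snd) :=
        (PySem.Set.mem_ofList _ _).mpr
          (List.mem_map_of_mem ((PySem.Set.mem_ofList l x).mp hx))
      rw [if_pos hx, if_pos hm, ih hl]
    · have hm : x.2 ∉ PySem.Set.ofList (l.map Prod.snd) := by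
        intro hmem
        rcases List.mem_map.mp ((PySem.Set.mem_ofList _ _).mp hmem) with ⟨y, hy, hy2⟩
        have hyx : y = x := Prod.ext ((hl y hy).trans hx1.symm) hy2
        exact hx ((PySem.Set.mem_ofList l x).mpr (hyx ▸ hy))
      rw [if_neg hx, if_neg hm, List.map_append, ih hl]
      simp only [List.map_cons, List.map_nil]

theorem pv_count_snd (P : List (String × String)) (u s : String) :
    ((P.filter (fun p => p.1 == u)).map Prod.snd).count s = P.count (u, s) := by
  induction P with
  | nil => rfl
  | cons p t ih =>
    obtain ⟨a, b⟩ := p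
    by_cases ha : a = u
    · subst ha
      by_cases hb : b = s
      · subst hb; simp [List.count_cons, ih]
      · simp [List.count_cons, ih, hb, Prod.ext_iff]
    · simp [List.count_cons, ih, ha, Prod.ext_iff]

theorem pv_keys_A (P : List (String × String)) :
    (P.foldl pvAStep PySem.Dict.empty).keys = PySem.Set.ofList (P.map Prod.fst) := by
  have h := PySem.Dict.keys_foldl_insert_key (ν := PySem.Dict String Int) P Prod.fst
    (fun d p => (d.getD p.1 PySem.Dict.empty).modify p.2 0 (· + 1)) PySem.Dict.empty
  simpa [pvAStep, PySem.Set.ofList, PySem.Set.update, PySem.Dict.keys] using h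

theorem pv_keys_B (P : List (String × String)) :
    ((PySem.Dict.counter P).items.foldl pvBStep PySem.Dict.empty).keys
      = PySem.Set.ofList (P.map Prod.fst) := by
  have h := PySem.Dict.keys_foldl_insert_key (ν := PySem.Dict String Int)
    (PySem.Dict.counter P).items (fun p => p.1.1)
    (fun r p => (r.getD p.1.1 PySem.Dict.empty).insert p.1.2 p.2) PySem.Dict.empty
  have h2 : (PySem.Dict.counter P).items.map (fun p => p.1.1)
      = (PySem.Set.ofList P).map Prod.fst := by
    rw [PySem.Dict.items_counter]; simp [List.map_map, Function.comp]
  rw [← pv_ofList_map_ofList Prod.fst P, ← h2]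
  simpa [pvBStep, PySem.Set.ofList, PySem.Set.update, PySem.Dict.keys] using h

theorem pv_innerA (P : List (String × String)) (u : String) :
    (P.foldl pvAStep PySem.Dict.empty).getD u PySem.Dict.empty
      = PySem.Dict.counter ((P.filter (fun p => p.1 == u)).map Prod.snd) := by
  rw [pv_getD_A, PySem.Dict.getD_empty]
  rfl

theorem pv_filter_mem (P : List (String × String)) (u : String) :
    ∀ x ∈ P.filter (fun k => k.1 == u), x.1 = u := by
  intro x hx
  exact beq_iff_eq.mp (List.mem_filter.mp hx).2

theorem pv_innerB (P : List (String × String)) (u : String) :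
    (((PySem.Dict.counter P).items.foldl pvBStep PySem.Dict.empty).getD u PySem.Dict.empty).items
      = (PySem.Set.ofList (P.filter (fun k => k.1 == u))).map
          (fun k => (k.2, (P.count k : Int))) := by
  rw [pv_getD_B, PySem.Dict.getD_empty, PySem.Dict.items_counter]
  rw [List.filter_map, List.map_map]
  have hQ : (PySem.Set.ofList P).filter ((fun p => p.1.1 == u) ∘ (fun k => (k, (P.count k : Int))))
      = PySem.Set.ofList (P.filter (fun k => k.1 == u)) := by
    rw [← pv_ofList_filter]
    rfl
  rw [hQ]
  have hL : List.map ((fun p => (p.1.2, p.2)) ∘ (fun k => (k, (P.count k : Int))))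
        (PySem.Set.ofList (P.filter (fun k => k.1 == u)))
      = List.map (fun k => (k.2, (P.count k : Int)))
        (PySem.Set.ofList (P.filter (fun k => k.1 == u))) := by
    simp [Function.comp_def]
  rw [hL]
  have hnd : ((PySem.Set.ofList (P.filter (fun k => k.1 == u))).map
      (fun k => (k.2, (P.count k : Int)))).map Prod.fst
        |>.Nodup := by
    rw [List.map_map]
    have : (Prod.fst ∘ fun k => ((k.2 : String), (P.count k : Int)))
        = Prod.snd (α := String) (β := String) := by
      funext k; rfl
    rw [this, pv_ofList_map_snd u (P.filter (fun k => k.1 == u)) (pv_filter_mem P u)]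
    exact PySem.Set.nodup_ofList _
  have h := PySem.Dict.items_foldl_insert_fresh
    ((PySem.Set.ofList (P.filter (fun k => k.1 == u))).map
      (fun k => (k.2, (P.count k : Int))))
    Prod.fst Prod.snd PySem.Dict.empty
    (fun a _ => by simp [PySem.Dict.contains_empty]) hnd
  simpa using h

theorem pv_inner_items_eq (P : List (String × String)) (u : String) :
    ((P.foldl pvAStep PySem.Dict.empty).getD u PySem.Dict.empty).items
      = (((PySem.Dict.counter P).items.foldl pvBStep
          PySem.Dict.empty).getD u PySem.Dict.empty).items := by
  rw [pv_innerA, PySem.Dict.items_counter, pv_innerB]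
  rw [← pv_ofList_map_snd u (P.filter (fun k => k.1 == u)) (pv_filter_mem P u), List.map_map]
  apply List.map_congr_left
  intro k hk
  have hk1 : k.1 = u :=
    pv_filter_mem P u k ((PySem.Set.mem_ofList _ _).mp hk)
  have hcnt := pv_count_snd P u k.2
  simp only [Function.comp_def]
  rw [hcnt]
  have : ((u, k.2) : String × String) = k := Prod.ext hk1.symm rfl
  rw [this]

-- ===== VERDICT (by name: the statement is the Claim_ definition above) =====
theorem summarize_status_rows_spec : Claim_equal_summarize_status_rows := by
  intro rows _
  unfold Spec_summarize_status_rows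
  rw [pv_A_eq, pv_B_eq]
  have hndA : (List.foldl pvAStep PySem.Dict.empty (pvPairs rows)).keys.Nodup := by
    rw [pv_keys_A]; exact PySem.Set.nodup_ofList _
  have hndB : (List.foldl pvBStep PySem.Dict.empty
      (PySem.Dict.counter (pvPairs rows)).items).keys.Nodup := by
    rw [pv_keys_B]; exact PySem.Set.nodup_ofList _
  rw [PySem.Dict.items_eq_map_keys _ hndA PySem.Dict.empty,
      PySem.Dict.items_eq_map_keys _ hndB PySem.Dict.empty, pv_keys_A, pv_keys_B,
      List.map_map, List.map_map]
  apply List.map_congr_left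
  intro u _
  simp only [Function.comp_def]
  exact congrArg (fun l => (u, l)) (pv_inner_items_eq (pvPairs rows) u)
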